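-- pv_equiv track=rewrite | github.com/oscarvanderheide/arrayview | src/arrayview/_routes_loading.py | _shape_compatible
-- ===== SOURCE A (Python) =====
-- def _shape_compatible(base: tuple, cand: tuple, mode: str) -> bool:
--     """Check whether a candidate shape is compatible with the base shape."""
--     if not base or not cand:
--         return True
--     if mode == "overlay":
--         return tuple(base) == tuple(cand)
--     if mode == "vectorfield":
--         if len(cand) != len(base) + 1:
--             return False
--         for drop_idx in range(len(cand)):
--             if cand[drop_idx] == 3 and tuple(
--                 cand[:drop_idx] + cand[drop_idx + 1 :]
--             ) == tuple(base):
--                 return True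
--         return False
--     return True
-- ===== SOURCE B (Python) =====
-- def _shape_compatible(base: tuple, cand: tuple, mode: str) -> bool:
--     """Check whether a candidate shape is compatible with the base shape."""
--     if not base or not cand:
--         return True
--     if mode == "overlay":
--         return tuple(base) == tuple(cand)
--     if mode != "vectorfield":
--         return True
--     if len(cand) != len(base) + 1:
--         return False
--     # single prefix sweep: find first divergence d, then one suffix compare
--     d = 0
--     n = len(base)
--     while d < n and base[d] == cand[d]:
--         d += 1
--     return cand[d] == 3 and tuple(cand[d + 1:]) == tuple(base[d:])
-- ===== Notes on version B (the rewrite author's own statement) =====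
-- stated objective: alternative
-- what changed: The vectorfield branch's try-every-drop-index loop (rebuilding and comparing a full candidate list per index) is replaced by one prefix sweep to the first divergence d followed by a single check cand[d]==3 and cand[d+1:]==base[d:].
import Mathlib
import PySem

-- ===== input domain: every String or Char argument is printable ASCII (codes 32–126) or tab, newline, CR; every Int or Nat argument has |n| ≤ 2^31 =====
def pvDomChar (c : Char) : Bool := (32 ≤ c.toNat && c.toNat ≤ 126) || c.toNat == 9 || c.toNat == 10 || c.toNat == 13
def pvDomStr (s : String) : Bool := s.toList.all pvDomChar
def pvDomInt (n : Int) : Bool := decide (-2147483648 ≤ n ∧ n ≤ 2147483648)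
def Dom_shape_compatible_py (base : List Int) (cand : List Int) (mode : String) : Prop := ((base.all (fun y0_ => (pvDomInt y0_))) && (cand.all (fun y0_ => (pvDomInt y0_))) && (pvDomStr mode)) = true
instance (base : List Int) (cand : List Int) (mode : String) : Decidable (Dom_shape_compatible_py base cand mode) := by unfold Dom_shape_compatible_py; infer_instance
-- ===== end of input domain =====

-- B replaces A's try-every-drop-index loop with a single prefix sweep to the
-- first divergence plus one suffix comparison (alternative algorithm).

-- ===== PORT A =====
-- the 'for drop_idx in range(len(cand))' loop: first index whose drop matches wins, else False
def pvDropAny (base cand : List Int) : List Nat → Bool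
  | [] => false
  | i :: rest =>
    if cand.getD i 0 = 3 ∧ cand.take i ++ cand.drop (i + 1) = base then true
    else pvDropAny base cand rest

def shape_compatible_py (base : List Int) (cand : List Int) (mode : String) : Bool :=
  if base = [] ∨ cand = [] then true
  else if mode = "overlay" then decide (base = cand)
  else if mode = "vectorfield" then
    if cand.length ≠ base.length + 1 then false
    else pvDropAny base cand (List.range cand.length)
  else true

-- ===== PORT B =====
-- the 'while d < n and base[d] == cand[d]: d += 1' sweep
def pvScanDiv : List Int → List Int → Nat
  | [], _ => 0
  | _ :: _, [] => 0
  | b :: bs, c :: cs => if b = c then pvScanDiv bs cs + 1 else 0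

-- the vectorfield branch of B after the length check
def pvVfCheck (base cand : List Int) : Bool :=
  let d := pvScanDiv base cand
  decide (cand.getD d 0 = 3 ∧ cand.drop (d + 1) = base.drop d)

def shape_compatible_py_alt (base : List Int) (cand : List Int) (mode : String) : Bool :=
  if base = [] ∨ cand = [] then true
  else if mode = "overlay" then decide (base = cand)
  else if mode ≠ "vectorfield" then true
  else if cand.length ≠ base.length + 1 then false
  else pvVfCheck base cand

-- ===== PRECONDITION & SPEC =====
def Spec_shape_compatible_py (base : List Int) (cand : List Int) (mode : String) (out : Bool) : Prop := out = shape_compatible_py_alt base cand mode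
instance (base : List Int) (cand : List Int) (mode : String) (out : Bool) : Decidable (Spec_shape_compatible_py base cand mode out) := by unfold Spec_shape_compatible_py; infer_instance

-- ===== CLAIM (what is proved, stated in full; the proofs are below) =====
def Claim_equal_shape_compatible_py : Prop := ∀ (base : List Int) (cand : List Int) (mode : String), Dom_shape_compatible_py base cand mode → Spec_shape_compatible_py base cand mode (shape_compatible_py base cand mode)

-- ===== LEMMAS AND PROOFS =====

-- checks at shifted indices succeed iff the heads agree and the unshifted check succeeds
lemma pvDropAny_shift (idxs : List Nat) (b : Int) (bs : List Int) (c : Int) (cs : List Int) :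
    pvDropAny (b :: bs) (c :: cs) (idxs.map Nat.succ) =
      if c = b then pvDropAny bs cs idxs else false := by
  induction idxs with
  | nil => by_cases hcb : c = b <;> simp [pvDropAny, hcb]
  | cons i rest ih =>
    simp only [List.map_cons, pvDropAny, List.getD_cons_succ, List.take_succ_cons,
      List.drop_succ_cons, List.cons_append, List.cons.injEq, ih]
    by_cases hcb : c = b <;> simp [hcb]

-- inserting a 3 in front of any list is always accepted by B's check
lemma pvVfCheck_ins3 (xs : List Int) : pvVfCheck xs (3 :: xs) = true := by
  induction xs with
  | nil => decide
  | cons x xs ih =>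
    by_cases hx : x = 3
    · subst hx
      simp only [pvVfCheck, pvScanDiv, List.drop_succ_cons] at ih ⊢
      exact ih
    · simp [pvVfCheck, pvScanDiv, hx]

-- the core equivalence on the vectorfield branch
lemma pvCore (base : List Int) : ∀ cand : List Int, cand.length = base.length + 1 →
    pvDropAny base cand (List.range cand.length) = pvVfCheck base cand := by
  induction base with
  | nil =>
    intro cand hlen
    match cand, hlen with
    | [c], _ =>
      by_cases hc : c = 3 <;>
        simp [pvDropAny, pvVfCheck, pvScanDiv, List.range, List.range.loop, hc]
  | cons b bs ih =>
    intro cand hlen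
    match cand, hlen with
    | c :: cs, hlen =>
      have hcs : cs.length = bs.length + 1 := by simpa using hlen
      have hr : List.range (c :: cs).length = 0 :: (List.range cs.length).map Nat.succ := by
        simp [List.range_succ_eq_map]
      rw [hr]
      simp only [pvDropAny, List.getD_cons_zero, List.take_zero, List.drop_succ_cons,
        List.drop_zero, List.nil_append, pvDropAny_shift, ih cs hcs]
      by_cases hcb : c = b
      · by_cases h3 : c = 3 ∧ cs = b :: bs
        · rw [if_pos h3]
          obtain ⟨h31, h32⟩ := h3
          rw [h32, h31]
          exact (pvVfCheck_ins3 (b :: bs)).symm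
        · rw [if_neg h3, if_pos hcb]
          simp [pvVfCheck, pvScanDiv, hcb]
      · have hbc : ¬ b = c := fun h => hcb h.symm
        by_cases h3 : c = 3 ∧ cs = b :: bs
        · rw [if_pos h3]
          obtain ⟨h31, h32⟩ := h3
          subst h31; subst h32
          simp [pvVfCheck, pvScanDiv, hbc]
        · rw [if_neg h3]
          simp [pvVfCheck, pvScanDiv, hbc, h3]
          exact fun h => absurd h hcb

-- ===== VERDICT (by name: the statement is the Claim_ definition above) =====
theorem shape_compatible_py_spec : Claim_equal_shape_compatible_py := by
  intro base cand mode _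
  unfold Spec_shape_compatible_py shape_compatible_py shape_compatible_py_alt
  by_cases h0 : base = [] ∨ cand = []
  · simp [h0]
  · rw [if_neg h0, if_neg h0]
    by_cases hov : mode = "overlay"
    · simp [hov]
    · rw [if_neg hov, if_neg hov]
      by_cases hvf : mode = "vectorfield"
      · rw [if_pos hvf]
        rw [if_neg (show ¬ mode ≠ "vectorfield" by simp [hvf])]
        by_cases hlen : cand.length ≠ base.length + 1
        · rw [if_pos hlen, if_pos hlen]
        · rw [if_neg hlen, if_neg hlen]
          exact pvCore base cand (by omega)
      · rw [if_neg hvf]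
        rw [if_pos (show mode ≠ "vectorfield" from hvf)]
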